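-- pv_equiv track=rewrite | github.com/daliwang777/SC-PPO | train/new_pool.py | gen_traj
-- ===== SOURCE A (Python) =====
-- def gen_traj(real_step):
--     real_trajectory=[]
--     if len(real_step)<3:
--         return []
--     for i in range(0,len(real_step),2):
--         if i+2>=len(real_step):
--             break
--         real_trajectory.append((real_step[i],real_step[i+1],real_step[i+2]))
--     return real_trajectory
-- ===== SOURCE B (Python) =====
-- def gen_traj(real_step):
--     return list(zip(real_step[0::2], real_step[1::2], real_step[2::2]))
-- ===== Notes on version B (the rewrite author's own statement) =====
-- stated objective: idiomatic
-- what changed: Replaces A's index loop over range(0,len,2) with bounds checks and a break by zipping the three strided slices xs[0::2], xs[1::2], xs[2::2]; zip's shortest-list cutoff replaces the break and the len<3 guard.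
import Mathlib
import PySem

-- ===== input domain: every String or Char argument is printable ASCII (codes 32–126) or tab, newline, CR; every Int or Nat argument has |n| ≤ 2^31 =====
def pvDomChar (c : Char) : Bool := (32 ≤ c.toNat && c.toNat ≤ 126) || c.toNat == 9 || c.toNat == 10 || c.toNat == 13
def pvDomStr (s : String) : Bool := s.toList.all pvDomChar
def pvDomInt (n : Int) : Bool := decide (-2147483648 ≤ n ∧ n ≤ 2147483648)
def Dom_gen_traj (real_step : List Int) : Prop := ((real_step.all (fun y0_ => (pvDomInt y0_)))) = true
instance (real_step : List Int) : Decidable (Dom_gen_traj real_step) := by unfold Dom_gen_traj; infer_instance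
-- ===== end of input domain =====

-- B replaces A's index loop (range step 2 + bounds check + break) by zipping the three
-- strided slices xs[0::2], xs[1::2], xs[2::2]; zip's shortest-list cutoff replaces the break.

-- ===== PORT A =====
-- the for-loop over range(0, len, 2); break on i+2 >= len becomes an early return of acc
def gen_traj_loop (xs : List Int) : List Int → List (Int × Int × Int) → List (Int × Int × Int)
  | [], acc => acc
  | i :: rest, acc =>
      if i + 2 ≥ (xs.length : Int) then acc
      else gen_traj_loop xs rest
        (acc ++ [(PySem.List.pyGetD xs i 0, PySem.List.pyGetD xs (i + 1) 0,
                  PySem.List.pyGetD xs (i + 2) 0)])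

def gen_traj (real_step : List Int) : List (Int × Int × Int) :=
  if (real_step.length : Int) < 3 then []
  else gen_traj_loop real_step (PySem.List.pyRange 0 real_step.length 2) []

-- ===== PORT B =====
-- list(zip(xs[0::2], xs[1::2], xs[2::2])): step-2 slices via slice? (step 2 ≠ 0, so some)
def gen_traj_alt (real_step : List Int) : List (Int × Int × Int) :=
  let evens := (PySem.List.slice? real_step (some 0) none 2).getD []
  let odds := (PySem.List.slice? real_step (some 1) none 2).getD []
  let thirds := (PySem.List.slice? real_step (some 2) none 2).getD []
  evens.zip (odds.zip thirds)

-- ===== PRECONDITION & SPEC =====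
def Spec_gen_traj (real_step : List Int) (out : List (Int × Int × Int)) : Prop := out = gen_traj_alt real_step
instance (real_step : List Int) (out : List (Int × Int × Int)) : Decidable (Spec_gen_traj real_step out) := by unfold Spec_gen_traj; infer_instance

-- ===== CLAIM (what is proved, stated in full; the proofs are below) =====
def Claim_equal_gen_traj : Prop := ∀ (real_step : List Int), Dom_gen_traj real_step → Spec_gen_traj real_step (gen_traj real_step)

-- ===== LEMMAS AND PROOFS =====

-- reference recursion: triples (xs[2k], xs[2k+1], xs[2k+2]) while three elements remain
def tri : List Int → List (Int × Int × Int)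
  | a :: b :: c :: rest => (a, b, c) :: tri (c :: rest)
  | _ => []
termination_by xs => xs.length

theorem tri_short (xs : List Int) (h : xs.length < 3) : tri xs = [] := by
  rw [tri.eq_def]
  split
  · simp at h; omega
  · rfl

theorem pyRange_two_cons (a b : Int) (h : a < b) :
    PySem.List.pyRange a b 2 = a :: PySem.List.pyRange (a + 2) b 2 := by
  rw [PySem.List.pyRange_of_pos a b (by norm_num), PySem.List.pyRange_of_pos (a + 2) b (by norm_num)]
  by_cases h2 : a + 2 < b
  · have hc : ((b - a + 2 - 1) / 2).toNat = ((b - (a + 2) + 2 - 1) / 2).toNat + 1 := by omega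
    rw [if_pos h, if_pos h2, hc, List.range_succ_eq_map]
    simp only [List.map_cons, List.map_map]
    refine List.cons_eq_cons.mpr ⟨by simp, ?_⟩
    apply List.map_congr_left
    intro k _
    simp only [Function.comp_apply]
    push_cast
    ring
  · have hc : ((b - a + 2 - 1) / 2).toNat = 1 := by omega
    rw [if_pos h, if_neg h2, hc]
    simp

theorem gen_traj_loop_spec (xs : List Int) (n : ℕ) (acc : List (Int × Int × Int)) :
    gen_traj_loop xs (PySem.List.pyRange (n : Int) xs.length 2) acc = acc ++ tri (xs.drop n) := by
  by_cases hn : n < xs.length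
  · rw [pyRange_two_cons _ _ (by exact_mod_cast hn)]
    by_cases h2 : n + 2 < xs.length
    · rw [gen_traj_loop]
      rw [if_neg (by omega)]
      have hcast : ((n : Int) + 2) = (((n + 2 : ℕ) : Int)) := by push_cast; ring
      rw [hcast, gen_traj_loop_spec xs (n + 2)]
      have h1 : n + 1 < xs.length := by omega
      have hd : xs.drop n = xs[n] :: xs[n + 1] :: xs[n + 2] :: xs.drop (n + 3) := by
        rw [List.drop_eq_getElem_cons hn, List.drop_eq_getElem_cons h1,
            List.drop_eq_getElem_cons h2]
      have hd2 : xs.drop (n + 2) = xs[n + 2] :: xs.drop (n + 3) := by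
        rw [List.drop_eq_getElem_cons h2]
      rw [hd, tri, ← hd2]
      rw [PySem.List.pyGetD_eq_getElem xs 0 (by omega) (by exact_mod_cast hn)]
      rw [PySem.List.pyGetD_eq_getElem xs 0 (by omega) (by exact_mod_cast h1)]
      rw [PySem.List.pyGetD_eq_getElem xs 0 (by omega) (by exact_mod_cast h2)]
      simp only [List.append_assoc, List.singleton_append]
      congr 2
    · rw [gen_traj_loop, if_pos (by omega)]
      rw [tri_short _ (by simp; omega)]
      simp
  · rw [PySem.List.pyRange_of_pos _ _ (by norm_num : (0:Int) < 2),
        if_neg (by exact_mod_cast hn)]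
    have hnil : xs.drop n = [] := List.drop_eq_nil_of_le (by omega)
    rw [List.range_zero, List.map_nil, gen_traj_loop, hnil, tri_short _ (by simp)]
    simp
termination_by xs.length - n

-- every other element, starting with the first
def stride2 : List Int → List Int
  | [] => []
  | [a] => [a]
  | a :: _ :: r => a :: stride2 r

theorem filterMap_range_succ (f : ℕ → Option Int) (c : ℕ) :
    List.filterMap f (List.range (c + 1))
      = (f 0).toList ++ List.filterMap (f ∘ Nat.succ) (List.range c) := by
  rw [List.range_succ_eq_map, List.filterMap_cons, List.filterMap_map]
  cases h : f 0 <;> simp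

theorem filterMap_two (xs : List Int) (a : ℕ) :
    List.filterMap (fun (k : ℕ) => xs[((a : Int) + 2 * (k : Int)).toNat]?)
      (List.range (((xs.length : Int) - (a : Int) + 1) / 2).toNat) = stride2 (xs.drop a) := by
  by_cases ha : xs.length ≤ a
  · rw [show (((xs.length : Int) - (a : Int) + 1) / 2).toNat = 0 by omega,
        List.drop_eq_nil_of_le ha]
    rfl
  · have ha' : a < xs.length := by omega
    have hc : (((xs.length : Int) - (a : Int) + 1) / 2).toNat
        = (((xs.length : Int) - ((a + 2 : ℕ) : Int) + 1) / 2).toNat + 1 := by push_cast; omega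
    rw [hc, filterMap_range_succ]
    have h0 : xs[((a : Int) + 2 * ((0 : ℕ) : Int)).toNat]? = some xs[a] := by
      simp [List.getElem?_eq_getElem ha']
    rw [h0]
    have hfun : ((fun (k : ℕ) => xs[((a : Int) + 2 * (k : Int)).toNat]?) ∘ Nat.succ)
        = fun (k : ℕ) => xs[(((a + 2 : ℕ) : Int) + 2 * (k : Int)).toNat]? := by
      funext k
      simp only [Function.comp_apply]
      congr 1
      push_cast
      omega
    rw [hfun, filterMap_two xs (a + 2)]
    have hda : xs.drop a = xs[a] :: xs.drop (a + 1) := List.drop_eq_getElem_cons ha'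
    by_cases h1 : a + 1 < xs.length
    · have hd1 : xs.drop (a + 1) = xs[a + 1] :: xs.drop (a + 2) := List.drop_eq_getElem_cons h1
      rw [hda, hd1, stride2]
      rfl
    · rw [hda, List.drop_eq_nil_of_le (by omega : xs.length ≤ a + 1),
          List.drop_eq_nil_of_le (by omega : xs.length ≤ a + 2)]
      rfl
termination_by xs.length - a

theorem slice?_from_two (xs : List Int) (a : Int) (ha : 0 ≤ a) :
    PySem.List.slice? xs (some a) none 2 = some (stride2 (xs.drop a.toNat)) := by
  obtain ⟨n, rfl⟩ := Int.eq_ofNat_of_zero_le ha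
  rw [PySem.List.slice?, PySem.List.sliceIndices]
  simp only [if_neg (show ¬ (2:Int) = 0 by norm_num), if_neg (show ¬ (2:Int) < 0 by norm_num),
    if_pos (show (0:Int) < 2 by norm_num), if_neg (show ¬ ((n:Int) < 0) by omega),
    Int.toNat_natCast]
  by_cases hn : n < xs.length
  · have hmin : min (n : Int) (xs.length : Int) = (n : Int) := by omega
    rw [hmin, if_pos (by exact_mod_cast hn),
        show ((xs.length : Int) - (n : Int) + 2 - 1) = ((xs.length : Int) - (n : Int) + 1) by ring]
    exact congrArg some (filterMap_two xs n)
  · have hmin : min (n : Int) (xs.length : Int) = (xs.length : Int) := by omega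
    rw [hmin, if_neg (by omega), List.drop_eq_nil_of_le (by omega : xs.length ≤ n)]
    rfl

theorem zip_stride_tri (xs : List Int) :
    (stride2 xs).zip ((stride2 (xs.drop 1)).zip (stride2 (xs.drop 2))) = tri xs := by
  match xs with
  | [] => rw [tri_short _ (by simp)]; rfl
  | [_] => rw [tri_short _ (by simp)]; rfl
  | [_, _] => rw [tri_short _ (by simp)]; rfl
  | a :: b :: c :: rest =>
    have ih := zip_stride_tri (c :: rest)
    simp only [List.drop_succ_cons, List.drop_zero] at ih ⊢
    have hcr : stride2 (c :: rest) = c :: stride2 (rest.drop 1) := by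
      match rest with
      | [] => rfl
      | _ :: t => rfl
    rw [show stride2 (a :: b :: c :: rest) = a :: stride2 (c :: rest) from rfl,
        show stride2 (b :: c :: rest) = b :: stride2 rest from rfl, hcr, tri]
    rw [hcr] at ih
    simp only [List.zip_cons_cons, List.cons.injEq, true_and]
    exact ih
termination_by xs.length

theorem gen_traj_eq_tri (xs : List Int) : gen_traj xs = tri xs := by
  unfold gen_traj
  by_cases h : (xs.length : Int) < 3
  · rw [if_pos h, tri_short _ (by exact_mod_cast h)]
  · rw [if_neg h]
    simpa using gen_traj_loop_spec xs 0 []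

-- ===== VERDICT (by name: the statement is the Claim_ definition above) =====
theorem gen_traj_spec : Claim_equal_gen_traj := by
  intro real_step _
  unfold Spec_gen_traj gen_traj_alt
  rw [slice?_from_two _ 0 (by norm_num), slice?_from_two _ 1 (by norm_num),
      slice?_from_two _ 2 (by norm_num)]
  simp only [Option.getD_some, Int.toNat_zero, Int.toNat_one,
    show (2:Int).toNat = 2 from rfl, List.drop_zero]
  rw [zip_stride_tri, gen_traj_eq_tri]
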